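-- pv_equiv track=rewrite | github.com/welsol21/weather_forecast | src/weather_patterns/pattern/windows.py | _merge_short_ranges
-- ===== SOURCE A (Python) =====
-- def _merge_short_ranges(ranges: list[tuple[int, int]], min_window_steps: int) -> list[tuple[int, int]]:
--     if not ranges:
--         return ranges
--     merged: list[list[int]] = [[start, end] for start, end in ranges]
--     changed = True
--     while changed and len(merged) > 1:
--         changed = False
--         for index, (start_index, end_index) in enumerate(merged):
--             if end_index - start_index + 1 >= min_window_steps:
--                 continue
--             if index == 0:
--                 merged[index + 1][0] = start_index
--             else:
--                 merged[index - 1][1] = end_index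
--             del merged[index]
--             changed = True
--             break
--     return [(start, end) for start, end in merged]
-- ===== SOURCE B (Python) =====
-- def _merge_short_ranges(ranges: list[tuple[int, int]], min_window_steps: int) -> list[tuple[int, int]]:
--     if not ranges:
--         return ranges
--     stack: list[tuple[int, int]] = []
--     for start, end in ranges:
--         if len(stack) == 1 and stack[0][1] - stack[0][0] + 1 < min_window_steps:
--             # a lone short range absorbs forward: the new range inherits its start
--             start = stack.pop()[0]
--         stack.append((start, end))
--         # merge a short top into the range below it, cascading
--         while len(stack) >= 2 and stack[-1][1] - stack[-1][0] + 1 < min_window_steps: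
--             _, e = stack.pop()
--             stack[-1] = (stack[-1][0], e)
--     return stack
-- ===== Notes on version B (the rewrite author's own statement) =====
-- stated objective: faster
-- what changed: Replaced A's restart-from-scratch fixpoint loop (rescan the whole list after every single merge) by one left-to-right pass with a stack: each range is pushed, a lone short first range is absorbed forward into the next push, and a short top is merged into the range below with cascading, so each range is touched O(1) amortized times.
import Mathlib
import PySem

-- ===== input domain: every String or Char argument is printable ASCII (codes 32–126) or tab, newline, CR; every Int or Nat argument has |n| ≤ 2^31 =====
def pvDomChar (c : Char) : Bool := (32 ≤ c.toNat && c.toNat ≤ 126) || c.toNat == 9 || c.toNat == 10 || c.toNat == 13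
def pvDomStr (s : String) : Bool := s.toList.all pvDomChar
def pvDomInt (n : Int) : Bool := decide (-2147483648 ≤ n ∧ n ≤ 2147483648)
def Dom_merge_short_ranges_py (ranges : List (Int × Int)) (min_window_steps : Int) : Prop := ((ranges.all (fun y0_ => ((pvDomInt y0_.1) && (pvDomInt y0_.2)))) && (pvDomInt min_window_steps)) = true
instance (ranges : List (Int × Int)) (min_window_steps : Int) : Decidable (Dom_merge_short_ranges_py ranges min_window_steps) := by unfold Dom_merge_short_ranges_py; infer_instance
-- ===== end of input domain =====

-- B replaces A's restart-and-rescan fixpoint loop by a single left-to-right stack pass (O(n) pass instead of a rescan per merge).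


-- ===== PORT A =====
-- A's inner `for`-scan, past the head: `pvScanTail m prev l` scans `prev :: l` for the first
-- short element at index ≥ 1 and returns the list replacing `prev :: l` after the merge
-- (predecessor's end := short element's end, short element deleted); none if no short element in l.
def pvScanTail (m : Int) (prev : Int × Int) : List (Int × Int) → Option (List (Int × Int))
  | [] => none
  | (s, e) :: rest =>
    if e - s + 1 < m then some ((prev.1, e) :: rest)
    else (pvScanTail m (s, e) rest).map (fun t => prev :: t)

-- One full `for index, … in enumerate(merged)` pass of A: the list after the first merge
-- (with `break`), or none when no element is short (changed stays False).
def pvScanA (m : Int) : List (Int × Int) → Option (List (Int × Int))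
  | [] => none
  | (s, e) :: rest =>
    if e - s + 1 < m then
      match rest with
      | (_, e2) :: rest2 => some ((s, e2) :: rest2)  -- merged[1][0] = start; del merged[0]
      | [] => none  -- unreachable: the while-guard ensures len(merged) > 1
    else pvScanTail m (s, e) rest

theorem pvScanTail_some_length {m : Int} {prev : Int × Int} {l out : List (Int × Int)}
    (h : pvScanTail m prev l = some out) : out.length = l.length := by
  induction l generalizing prev out with
  | nil => simp [pvScanTail] at h
  | cons x rest ih =>
    obtain ⟨s, e⟩ := x
    by_cases hs : e - s + 1 < m
    · simp [pvScanTail, hs] at h; subst h; simp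
    · simp [pvScanTail, hs] at h
      obtain ⟨t, ht, rfl⟩ := h
      simp [ih ht]

theorem pvScanA_some_length {m : Int} {l out : List (Int × Int)}
    (h : pvScanA m l = some out) : out.length < l.length := by
  match l with
  | [] => simp [pvScanA] at h
  | (s, e) :: rest =>
    by_cases hs : e - s + 1 < m
    · match rest with
      | [] => simp [pvScanA, hs] at h
      | (s2, e2) :: rest2 => simp [pvScanA, hs] at h; subst h; simp
    · simp [pvScanA, hs] at h
      have := pvScanTail_some_length h
      simp [this]

-- A's `while changed and len(merged) > 1` loop.
def pvLoopA (m : Int) (merged : List (Int × Int)) : List (Int × Int) :=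
  if 1 < merged.length then
    match hs : pvScanA m merged with
    | some l => pvLoopA m l
    | none => merged
  else merged
termination_by merged.length
decreasing_by exact pvScanA_some_length hs

def merge_short_ranges_py (ranges : List (Int × Int)) (min_window_steps : Int) : List (Int × Int) :=
  if ranges = [] then ranges
  else pvLoopA min_window_steps (ranges.map (fun p => (p.1, p.2)))

-- ===== PORT B =====
-- B's `while len(stack) >= 2 and top short` cascade; stack is kept head = top (reversed).
def pvSettle (m : Int) : List (Int × Int) → List (Int × Int)
  | (s, e) :: (ps, pe) :: rest =>
    if e - s + 1 < m then pvSettle m ((ps, e) :: rest)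
    else (s, e) :: (ps, pe) :: rest
  | l => l
termination_by l => l.length

-- One iteration of B's `for` loop: absorb a lone short stack element forward, push, cascade.
def pvStep (m : Int) (stack : List (Int × Int)) (r : Int × Int) : List (Int × Int) :=
  match stack with
  | [(s0, e0)] =>
    if e0 - s0 + 1 < m then pvSettle m [(s0, r.2)]
    else pvSettle m (r :: [(s0, e0)])
  | _ => pvSettle m (r :: stack)

def merge_short_ranges_py_alt (ranges : List (Int × Int)) (min_window_steps : Int) : List (Int × Int) :=
  if ranges = [] then ranges
  else (ranges.foldl (pvStep min_window_steps) []).reverse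

-- ===== PRECONDITION & SPEC =====
def Spec_merge_short_ranges_py (ranges : List (Int × Int)) (min_window_steps : Int) (out : List (Int × Int)) : Prop := out = merge_short_ranges_py_alt ranges min_window_steps
instance (ranges : List (Int × Int)) (min_window_steps : Int) (out : List (Int × Int)) : Decidable (Spec_merge_short_ranges_py ranges min_window_steps out) := by unfold Spec_merge_short_ranges_py; infer_instance

-- ===== CLAIM (what is proved, stated in full; the proofs are below) =====
def Claim_equal_merge_short_ranges_py : Prop := ∀ (ranges : List (Int × Int)) (min_window_steps : Int), Dom_merge_short_ranges_py ranges min_window_steps → Spec_merge_short_ranges_py ranges min_window_steps (merge_short_ranges_py ranges min_window_steps)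

-- ===== LEMMAS AND PROOFS =====

-- "long" = not short
def pvLong (m : Int) (r : Int × Int) : Prop := ¬ (r.2 - r.1 + 1 < m)

-- Invariant on B's stack between pushes.
def pvInv (m : Int) (stack : List (Int × Int)) : Prop :=
  stack.length ≤ 1 ∨ ∀ r ∈ stack, pvLong m r

theorem pvScanTail_none {m : Int} (l : List (Int × Int)) (h : ∀ r ∈ l, pvLong m r)
    (prev : Int × Int) : pvScanTail m prev l = none := by
  induction l generalizing prev with
  | nil => simp [pvScanTail]
  | cons x rest ih =>
    obtain ⟨s, e⟩ := x
    have hx : pvLong m (s, e) := h _ (by simp)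
    simp only [pvLong] at hx
    simp [pvScanTail, hx, ih (fun r hr => h r (by simp [hr]))]

theorem pvScanA_none {m : Int} (l : List (Int × Int)) (h : ∀ r ∈ l, pvLong m r) :
    pvScanA m l = none := by
  match l with
  | [] => simp [pvScanA]
  | (s, e) :: rest =>
    have hx : pvLong m (s, e) := h _ (by simp)
    simp only [pvLong] at hx
    simp [pvScanA, hx, pvScanTail_none rest (fun r hr => h r (by simp [hr])) _]

-- The scan finds the short element `top` just past an all-long prefix and merges it into `p`.
theorem pvScanTail_at {m : Int} {top : Int × Int} (htop : top.2 - top.1 + 1 < m)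
    (rest' : List (Int × Int)) (p : Int × Int) (hp : pvLong m p) :
    ∀ (fs : List (Int × Int)), (∀ r ∈ fs, pvLong m r) → ∀ q : Int × Int,
      pvScanTail m q (fs ++ p :: top :: rest') = some (q :: (fs ++ (p.1, top.2) :: rest')) := by
  intro fs
  induction fs with
  | nil =>
    intro _ q
    obtain ⟨ps, pe⟩ := p
    obtain ⟨ts, te⟩ := top
    simp only [pvLong] at hp
    simp at htop
    simp [pvScanTail, hp, htop]
  | cons f fs' ih =>
    intro hfs q
    obtain ⟨fs1, fe⟩ := f
    have hf : pvLong m (fs1, fe) := hfs _ (by simp)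
    simp only [pvLong] at hf
    simp [pvScanTail, hf, ih (fun r hr => hfs r (by simp [hr]))]

theorem pvScanA_at {m : Int} {top : Int × Int} (htop : top.2 - top.1 + 1 < m)
    (rest' : List (Int × Int)) (p : Int × Int) (hp : pvLong m p)
    (front : List (Int × Int)) (hfront : ∀ r ∈ front, pvLong m r) :
    pvScanA m (front ++ p :: top :: rest') = some (front ++ (p.1, top.2) :: rest') := by
  match front with
  | [] =>
    obtain ⟨ps, pe⟩ := p
    obtain ⟨ts, te⟩ := top
    simp only [pvLong] at hp
    simp at htop
    simp [pvScanA, pvScanTail, hp, htop]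
  | (fs1, fe) :: fs' =>
    have hf : pvLong m (fs1, fe) := hfront _ (by simp)
    simp only [pvLong] at hf
    simp [pvScanA, hf,
      pvScanTail_at htop rest' p hp fs' (fun r hr => hfront r (by simp [hr])) _]

-- pvLoopA unfoldings
theorem pvLoopA_stop {m : Int} {l : List (Int × Int)} (h : ¬ 1 < l.length) :
    pvLoopA m l = l := by
  rw [pvLoopA]; simp [h]

theorem pvLoopA_none {m : Int} {l : List (Int × Int)} (h : pvScanA m l = none) :
    pvLoopA m l = l := by
  rw [pvLoopA]
  split
  · split
    · simp_all
    · rfl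
  · rfl

theorem pvLoopA_step {m : Int} {l l' : List (Int × Int)} (hlen : 1 < l.length)
    (h : pvScanA m l = some l') : pvLoopA m l = pvLoopA m l' := by
  rw [pvLoopA]
  split
  · split
    · simp_all
    · simp_all
  · omega

-- the cascade of B corresponds step-for-step to A's merges
theorem pvSettle_loop {m : Int} (rest' : List (Int × Int)) :
    ∀ (bot : List (Int × Int)), (∀ r ∈ bot, pvLong m r) → ∀ top : Int × Int,
      pvLoopA m (bot.reverse ++ top :: rest') =
      pvLoopA m ((pvSettle m (top :: bot)).reverse ++ rest') := by
  intro bot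
  induction bot with
  | nil => intro _ top; simp [pvSettle]
  | cons p bot' ih =>
    intro hbot top
    obtain ⟨ts, te⟩ := top
    obtain ⟨ps, pe⟩ := p
    by_cases hs : te - ts + 1 < m
    · have hp : pvLong m (ps, pe) := hbot _ (by simp)
      have hbot' : ∀ r ∈ bot', pvLong m r := fun r hr => hbot r (by simp [hr])
      have hbotrev : ∀ r ∈ bot'.reverse, pvLong m r := by simpa using hbot'
      have hstep : pvScanA m (bot'.reverse ++ (ps, pe) :: (ts, te) :: rest') =
          some (bot'.reverse ++ (ps, te) :: rest') :=
        pvScanA_at (top := (ts, te)) (by simpa using hs) rest' (ps, pe) hp bot'.reverse hbotrev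
      have hlen : 1 < (bot'.reverse ++ (ps, pe) :: (ts, te) :: rest').length := by
        simp; omega
      have h1 : pvLoopA m (((ps, pe) :: bot').reverse ++ (ts, te) :: rest') =
          pvLoopA m (bot'.reverse ++ (ps, te) :: rest') := by
        have : ((ps, pe) :: bot').reverse ++ (ts, te) :: rest' =
            bot'.reverse ++ (ps, pe) :: (ts, te) :: rest' := by simp
        rw [this, pvLoopA_step hlen hstep]
      rw [h1, ih hbot' (ps, te)]
      have : pvSettle m ((ts, te) :: (ps, pe) :: bot') = pvSettle m ((ps, te) :: bot') := by
        rw [pvSettle]; simp [hs]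
      rw [this]
    · have : pvSettle m ((ts, te) :: (ps, pe) :: bot') = (ts, te) :: (ps, pe) :: bot' := by
        rw [pvSettle]; simp [hs]
      rw [this]
      simp

theorem pvSettle_inv {m : Int} :
    ∀ (bot : List (Int × Int)), (∀ r ∈ bot, pvLong m r) → ∀ top : Int × Int,
      pvInv m (pvSettle m (top :: bot)) := by
  intro bot
  induction bot with
  | nil => intro _ top; simp [pvSettle, pvInv]
  | cons p bot' ih =>
    intro hbot top
    obtain ⟨ts, te⟩ := top
    obtain ⟨ps, pe⟩ := p
    by_cases hs : te - ts + 1 < m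
    · rw [pvSettle]
      simp only [hs, if_true]
      exact ih (fun r hr => hbot r (by simp [hr])) (ps, te)
    · rw [pvSettle]
      simp only [hs, if_false]
      right
      intro r hr
      rcases List.mem_cons.mp hr with h | h
      · simp [h, pvLong, hs]
      · exact hbot r h

-- One push of B = the corresponding segment of A's loop.
theorem pvStep_sim {m : Int} (rest' : List (Int × Int)) (r : Int × Int)
    (stack : List (Int × Int)) (hinv : pvInv m stack) :
    pvLoopA m (stack.reverse ++ r :: rest') =
    pvLoopA m ((pvStep m stack r).reverse ++ rest') := by
  have hlong : (∀ x ∈ stack, pvLong m x) →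
      pvLoopA m (stack.reverse ++ r :: rest') =
      pvLoopA m ((pvSettle m (r :: stack)).reverse ++ rest') := fun h =>
    pvSettle_loop rest' stack h r
  match stack with
  | [] => simp [pvStep, pvSettle]
  | [(s0, e0)] =>
    by_cases hs : e0 - s0 + 1 < m
    · -- lone short element absorbed forward: one A-step at index 0
      obtain ⟨rs, re⟩ := r
      have hstep : pvScanA m ((s0, e0) :: (rs, re) :: rest') =
          some ((s0, re) :: rest') := by
        simp [pvScanA, hs]
      have h1 : pvLoopA m ((s0, e0) :: (rs, re) :: rest') =
          pvLoopA m ((s0, re) :: rest') := pvLoopA_step (by simp) hstep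
      simp only [pvStep, hs, if_true]
      simpa [pvSettle] using h1
    · exact (by simpa [pvStep, hs] using hlong (by simp [pvLong]; omega))
  | x :: y :: rest =>
    have hall : ∀ r ∈ x :: y :: rest, pvLong m r := by
      rcases hinv with h | h
      · simp at h
      · exact h
    exact (by simpa [pvStep] using hlong hall)

theorem pvMain {m : Int} :
    ∀ (rest : List (Int × Int)) (stack : List (Int × Int)), pvInv m stack →
      pvLoopA m (stack.reverse ++ rest) = (List.foldl (pvStep m) stack rest).reverse := by
  intro rest
  induction rest with
  | nil =>
    intro stack hinv
    simp only [List.append_nil, List.foldl_nil]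
    rcases hinv with h | h
    · exact pvLoopA_stop (by simp; omega)
    · exact pvLoopA_none (pvScanA_none _ (by simpa using h))
  | cons r rest' ih =>
    intro stack hinv
    have hinv' : pvInv m (pvStep m stack r) := by
      match stack with
      | [] => simpa [pvStep] using pvSettle_inv (m := m) [] (by simp) r
      | [(s0, e0)] =>
        by_cases hs : e0 - s0 + 1 < m
        · simp [pvStep, hs, pvSettle, pvInv]
        · simp only [pvStep, hs, if_false]
          exact pvSettle_inv [(s0, e0)] (by simp [pvLong]; omega) r
      | x :: y :: rest =>
        have hall : ∀ r ∈ x :: y :: rest, pvLong m r := by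
          rcases hinv with h | h
          · simp at h
          · exact h
        simpa [pvStep] using pvSettle_inv (x :: y :: rest) hall r
    rw [pvStep_sim rest' r stack hinv, ih _ hinv']
    simp

-- ===== VERDICT (by name: the statement is the Claim_ definition above) =====
theorem merge_short_ranges_py_spec : Claim_equal_merge_short_ranges_py := by
  intro ranges m _
  unfold Spec_merge_short_ranges_py merge_short_ranges_py merge_short_ranges_py_alt
  by_cases h : ranges = []
  · simp [h]
  · simp only [h, if_false]
    have := pvMain (m := m) ranges [] (by simp [pvInv])
    simpa using this
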